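-- pv_equiv track=rewrite | github.com/Koeunseooooo/Algorithm | 백준/삼성역테/17410.py | rr
-- ===== SOURCE A (Python) =====
-- from collections import defaultdict
--
-- def rr(arr):
--     new_arr = []
--     for i in range(len(arr)):
--         tar = arr[i]  # 각 행
--         dic = defaultdict(int)  # count를 위한 딕셔너리 초기화
--         for t in tar:
--             if t != 0:
--                 dic[t] += 1
--         li = list(dic.items())
--         li.sort(key=lambda x: (x[1], x[0]))
--         new = []
--         for l in li:
--             n, c = l
--             new.append(n)
--             new.append(c)
--         new = new[:100]
--         new_arr.append(new)
--     max_r = max(map(len, new_arr))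
--     # 각 행을 가장 긴 열의 길이에 맞게 확장하고 부족한 부분을 0으로 채움
--     arr = [row + [0] * (max_r - len(row)) for row in new_arr]
--     return arr
-- ===== SOURCE B (Python) =====
-- def rr(arr):
--     rows = []
--     for tar in arr:
--         vals = sorted(t for t in tar if t != 0)
--         # run-length encode the sorted values: (value, count) pairs
--         pairs = []
--         rest = vals
--         while rest:
--             v = rest[0]
--             k = 1
--             while k < len(rest) and rest[k] == v:
--                 k += 1
--             pairs.append((v, k))
--             rest = rest[k:]
--         pairs.sort(key=lambda p: (p[1], p[0]))
--         new = []
--         for v, c in pairs: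
--             new.append(v)
--             new.append(c)
--         rows.append(new[:100])
--     max_r = max(map(len, rows), default=0)
--     return [row + [0] * (max_r - len(row)) for row in rows]
-- ===== Notes on version B (the rewrite author's own statement) =====
-- stated objective: alternative
-- what changed: B replaces A's defaultdict counting with sort-then-run-length-encode per row: nonzero values are sorted and contiguous runs become (value, count) pairs, which are then sorted by (count, value) and flattened exactly as A does.
import Mathlib
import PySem

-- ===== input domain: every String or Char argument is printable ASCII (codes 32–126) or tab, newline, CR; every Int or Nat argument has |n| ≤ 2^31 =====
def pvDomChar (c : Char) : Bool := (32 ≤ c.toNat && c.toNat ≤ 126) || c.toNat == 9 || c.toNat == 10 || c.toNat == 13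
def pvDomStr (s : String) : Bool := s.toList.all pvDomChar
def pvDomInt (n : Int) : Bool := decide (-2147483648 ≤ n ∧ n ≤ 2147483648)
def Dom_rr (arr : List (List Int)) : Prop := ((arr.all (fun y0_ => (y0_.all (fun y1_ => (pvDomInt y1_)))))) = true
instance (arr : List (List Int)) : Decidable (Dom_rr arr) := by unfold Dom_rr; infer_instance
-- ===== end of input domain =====

-- B replaces A's defaultdict counting with sort-then-run-length-encode per row (alternative algorithm, similar cost); on the empty list A raises ValueError while B returns [].


-- ===== PORT A =====
-- one row of A: count nonzeros into a dict (defaultdict loop), sort items by (count, value), flatten, take new[:100]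
def rrRowA (tar : List Int) : List Int :=
  ((PySem.List.sorted2
      (tar.foldl (fun d t => if t ≠ 0 then d.insert t (d.getD t 0 + 1) else d) PySem.Dict.empty).items
      (fun x => x.2) (fun x => x.1)).foldl (fun acc l => acc ++ [l.1, l.2]) []).take 100
      -- new[:100] = take 100: exact for a nonnegative literal bound

def rr (arr : List (List Int)) : List (List Int) :=
  -- for i in range(len(arr)): tar = arr[i]; … — iterating the indices of arr reads exactly its elements in order
  let new_arr := arr.foldl (fun acc tar => acc ++ [rrRowA tar]) []
  -- max(map(len, new_arr)) raises ValueError on the empty list — Pre_rr excludes arr = []; the getD 0 default is never reached inside Pre_rr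
  let max_r := (PySem.List.max? (new_arr.map (fun r => (r.length : Int))) (fun x => x)).getD 0
  new_arr.map (fun row => row ++ List.replicate (max_r - (row.length : Int)).toNat 0)

-- ===== PORT B =====
-- run-length encoding of Source B's outer while loop over `rest`: takeWhile/dropWhile are the inner k-scan and rest[k:]
def rleB (vals : List Int) : List (Int × Int) :=
  match vals with
  | [] => []
  | v :: xs =>
      (v, (1 + (xs.takeWhile (fun x => x == v)).length : Int)) :: rleB (xs.dropWhile (fun x => x == v))
  termination_by vals.length
  decreasing_by
    simp only [List.length_cons]
    exact Nat.lt_succ_of_le (List.length_dropWhile_le _ _)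

-- one row of B: sort the nonzero values, run-length encode, sort the pairs by (count, value), flatten, take new[:100]
def rrRowB (tar : List Int) : List Int :=
  ((PySem.List.sorted2
      (rleB (PySem.List.sorted (tar.filter (fun t => t ≠ 0)) (fun x => x)))
      (fun p => p.2) (fun p => p.1)).foldl (fun acc p => acc ++ [p.1, p.2]) []).take 100

def rr_alt (arr : List (List Int)) : List (List Int) :=
  let rows := arr.foldl (fun acc tar => acc ++ [rrRowB tar]) []
  let max_r := (PySem.List.max? (rows.map (fun r => (r.length : Int))) (fun x => x)).getD 0  -- max(…, default=0)
  rows.map (fun row => row ++ List.replicate (max_r - (row.length : Int)).toNat 0)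

-- ===== PRECONDITION & SPEC =====
-- Pre_rr excludes only the empty outer list, on which A's max(map(len, new_arr)) raises ValueError (B returns [] there, outside the claim)
def Pre_rr (arr : List (List Int)) : Prop := arr ≠ []
instance (arr : List (List Int)) : Decidable (Pre_rr arr) := by unfold Pre_rr; infer_instance
def pvWitness_rr : List (List Int) := [[1, 1, 2, 0], [3]]

def Spec_rr (arr : List (List Int)) (out : List (List Int)) : Prop := out = rr_alt arr
instance (arr : List (List Int)) (out : List (List Int)) : Decidable (Spec_rr arr out) := by unfold Spec_rr; infer_instance

-- ===== CLAIM (what is proved, stated in full; the proofs are below) =====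
def Claim_equal_rr : Prop := ∀ (arr : List (List Int)), Dom_rr arr → Pre_rr arr → Spec_rr arr (rr arr)

-- ===== LEMMAS AND PROOFS =====

-- everything dropWhile (== v) keeps from a sorted list with lower bound v is strictly above v
lemma lt_of_mem_dropWhile : ∀ (xs : List Int) (v : Int), (∀ y ∈ xs, v ≤ y) → xs.Pairwise (· ≤ ·) →
    ∀ x ∈ xs.dropWhile (fun x => x == v), v < x
  | [], v, _, _ => by intro x hx; simp at hx
  | w :: t, v, hle, hp => by
    intro x hx
    by_cases hwv : w = v
    · simp only [List.dropWhile_cons, hwv, BEq.rfl, if_true] at hx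
      exact lt_of_mem_dropWhile t v (fun y hy => hle y (List.mem_cons_of_mem _ hy))
        ((List.pairwise_cons.mp hp).2) x hx
    · have hvw : v < w := lt_of_le_of_ne (hle w (List.mem_cons_self)) (Ne.symm hwv)
      simp only [List.dropWhile_cons, beq_iff_eq, hwv, if_false] at hx
      rcases List.mem_cons.mp hx with rfl | hxt
      · exact hvw
      · exact lt_of_lt_of_le hvw ((List.pairwise_cons.mp hp).1 x hxt)

-- on a sorted list, the run-length pairs are exactly (value present, its count)
lemma mem_rleB (ys : List Int) : ys.Pairwise (· ≤ ·) → ∀ p : Int × Int,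
    (p ∈ rleB ys ↔ p.1 ∈ ys ∧ p.2 = (ys.count p.1 : Int)) := by
  induction ys using rleB.induct with
  | case1 => intro _ p; simp [rleB]
  | case2 v xs ih =>
    intro hp p
    obtain ⟨hle, hxp⟩ := List.pairwise_cons.mp hp
    set t := xs.takeWhile (fun x => x == v) with ht
    set d := xs.dropWhile (fun x => x == v) with hd
    have htv : ∀ x ∈ t, x = v := fun x hx => by simpa using List.mem_takeWhile_imp hx
    have hdlt : ∀ x ∈ d, v < x := lt_of_mem_dropWhile xs v hle hxp
    have hsplit : t ++ d = xs := List.takeWhile_append_dropWhile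
    have hdp : d.Pairwise (· ≤ ·) := hxp.sublist (List.dropWhile_sublist _)
    have hct : t.count v = t.length := List.count_eq_length.mpr (fun b hb => (htv b hb).symm)
    have hcd : d.count v = 0 := List.count_eq_zero.mpr (fun hvd => lt_irrefl v (hdlt v hvd))
    have hcv : (v :: xs).count v = t.length + 1 := by
      rw [show v :: xs = v :: (t ++ d) by rw [hsplit]]
      simp [List.count_append, hct, hcd]
    have hck : ∀ k, v < k → (v :: xs).count k = d.count k := by
      intro k hk
      have hkt : t.count k = 0 := List.count_eq_zero.mpr
        (fun hkt => absurd (htv k hkt) (by intro h; rw [h] at hk; exact lt_irrefl v hk))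
      rw [show v :: xs = v :: (t ++ d) by rw [hsplit]]
      simp [List.count_cons, List.count_append, hkt]
      omega
    rw [rleB]
    constructor
    · intro hmem
      rcases List.mem_cons.mp hmem with rfl | hmem'
      · refine ⟨List.mem_cons_self, ?_⟩
        simp only [hcv]
        push_cast
        ring
      · obtain ⟨h1, h2⟩ := (ih hdp p).mp hmem'
        have hp1d : v < p.1 := hdlt p.1 h1
        refine ⟨List.mem_cons_of_mem _ ((List.dropWhile_sublist _).subset h1), ?_⟩
        rw [hck p.1 hp1d]
        exact h2
    · rintro ⟨h1, h2⟩
      by_cases hpv : p.1 = v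
      · have hp2 : p.2 = (1 + (t.length : Int)) := by
          rw [h2, hpv, hcv]; push_cast; ring
        have hpp : p = (v, 1 + (t.length : Int)) := by
          calc p = (p.1, p.2) := rfl
            _ = (v, 1 + (t.length : Int)) := by rw [hpv, hp2]
        rw [hpp]
        exact List.mem_cons_self
      · have hpx : p.1 ∈ xs := by
          rcases List.mem_cons.mp h1 with h | h
          · exact absurd h hpv
          · exact h
        have hpd : p.1 ∈ d := by
          rw [← hsplit] at hpx
          rcases List.mem_append.mp hpx with h | h
          · exact absurd (htv _ h) hpv
          · exact h
        refine List.mem_cons_of_mem _ ((ih hdp p).mpr ⟨hpd, ?_⟩)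
        rw [h2, hck p.1 (hdlt p.1 hpd)]

lemma rleB_pairwise_fst (ys : List Int) : ys.Pairwise (· ≤ ·) →
    (rleB ys).Pairwise (fun a b => a.1 < b.1) := by
  induction ys using rleB.induct with
  | case1 => intro _; simp [rleB]
  | case2 v xs ih =>
    intro hp
    obtain ⟨hle, hxp⟩ := List.pairwise_cons.mp hp
    have hdlt : ∀ x ∈ xs.dropWhile (fun x => x == v), v < x := lt_of_mem_dropWhile xs v hle hxp
    have hdp : (xs.dropWhile (fun x => x == v)).Pairwise (· ≤ ·) :=
      hxp.sublist (List.dropWhile_sublist _)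
    rw [rleB]
    refine List.pairwise_cons.mpr ⟨?_, ih hdp⟩
    intro q hq
    exact hdlt q.1 ((mem_rleB _ hdp q).mp hq).1

-- A's boolean (count, value) comparison is the lexicographic order on the swapped pair
lemma lt_funs_eq :
    (fun (a b : Int × Int) => decide (a.2 < b.2) || (!decide (b.2 < a.2) && decide (a.1 < b.1)))
      = (fun (a b : Int × Int) => decide (toLex (a.2, a.1) < toLex (b.2, b.1))) := by
  funext a b
  have h : (toLex (a.2, a.1) < toLex (b.2, b.1)) ↔ (a.2 < b.2 ∨ a.2 = b.2 ∧ a.1 < b.1) :=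
    Prod.Lex.toLex_lt_toLex
  apply Bool.eq_iff_iff.mpr
  simp only [Bool.or_eq_true, Bool.and_eq_true, Bool.not_eq_true', decide_eq_true_eq,
    decide_eq_false_iff_not, h]
  omega

lemma sorted2_swap_eq_sorted_lex (xs : List (Int × Int)) :
    PySem.List.sorted2 xs (fun p => p.2) (fun p => p.1)
      = PySem.List.sorted xs (fun p => toLex (p.2, p.1)) := by
  show List.foldl (fun acc x => PySem.List.insertBy (fun (a b : Int × Int) => decide (a.2 < b.2) || (!decide (b.2 < a.2) && decide (a.1 < b.1))) x acc) [] xs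
     = List.foldl (fun acc x => PySem.List.insertBy (fun (a b : Int × Int) => decide (toLex (a.2, a.1) < toLex (b.2, b.1))) x acc) [] xs
  rw [lt_funs_eq]

-- A's guarded counting loop is the counting loop over the filtered list
lemma foldl_if_filter (xs : List Int) (d : PySem.Dict Int Int) :
    xs.foldl (fun d t => if t ≠ 0 then d.insert t (d.getD t 0 + 1) else d) d
      = (xs.filter (fun t => t ≠ 0)).foldl (fun d t => d.insert t (d.getD t 0 + 1)) d := by
  induction xs generalizing d with
  | nil => rfl
  | cons x xs ih =>
      simp only [List.foldl_cons, List.filter_cons]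
      by_cases hx : x = 0
      · simp only [hx]
        simpa using ih d
      · have hdx : (decide (x ≠ 0)) = true := by simpa using hx
        simp only [hdx, if_pos hx]
        simpa [hx] using ih (d.insert x (d.getD x 0 + 1))

lemma row_eq (tar : List Int) : rrRowA tar = rrRowB tar := by
  unfold rrRowA rrRowB
  rw [foldl_if_filter, PySem.Dict.foldl_insert_getD_add_one_eq_counter, PySem.Dict.items_counter]
  rw [sorted2_swap_eq_sorted_lex, sorted2_swap_eq_sorted_lex]
  set f := tar.filter (fun t => t ≠ 0) with hf
  set ys := PySem.List.sorted f (fun x => x) with hys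
  have hysp : ys.Pairwise (· ≤ ·) := by
    simpa using PySem.List.sorted_pairwise f (fun x => x)
  have hinj : Function.Injective (fun p : Int × Int => toLex (p.2, p.1)) := by
    intro a b h
    have h2 : ((a.2, a.1) : Int × Int) = (b.2, b.1) := toLex.injective h
    have h3 := (Prod.mk.injEq _ _ _ _).mp h2
    exact Prod.ext h3.2 h3.1
  have hnd1 : ((PySem.Set.ofList f).map (fun k => (k, (f.count k : Int)))).Nodup :=
    (PySem.Set.nodup_ofList f).map (fun x y hxy => ((Prod.mk.injEq _ _ _ _).mp hxy).1)
  have hnd2 : (rleB ys).Nodup :=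
    (rleB_pairwise_fst ys hysp).imp (fun h he => by rw [he] at h; exact lt_irrefl _ h)
  have hperm : ((PySem.Set.ofList f).map (fun k => (k, (f.count k : Int)))).Perm (rleB ys) := by
    rw [List.perm_ext_iff_of_nodup hnd1 hnd2]
    intro p
    rw [List.mem_map, mem_rleB ys hysp p]
    have hcys : ys.count p.1 = f.count p.1 := (PySem.List.sorted_perm f (fun x => x) false).count_eq p.1
    have hmys : p.1 ∈ ys ↔ p.1 ∈ f := PySem.List.mem_sorted f (fun x => x) false p.1
    rw [hcys, hmys]
    constructor
    · rintro ⟨k, hk, rfl⟩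
      exact ⟨(PySem.Set.mem_ofList f k).mp hk, rfl⟩
    · rintro ⟨h1, h2⟩
      exact ⟨p.1, (PySem.Set.mem_ofList f p.1).mpr h1, (Prod.ext rfl h2.symm : (p.1, (f.count p.1 : Int)) = p)⟩
  rw [PySem.List.sorted_eq_sorted_of_perm _ _ _ hinj hperm]

-- ===== VERDICT (by name: the statement is the Claim_ definition above) =====
theorem rr_spec : Claim_equal_rr := by
  intro arr _ _
  show rr arr = rr_alt arr
  unfold rr rr_alt
  rw [show rrRowA = rrRowB from funext row_eq]
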